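-- pv_equiv track=rewrite | github.com/rameezw16/Steam-Automation | main.py | _side_by_side
-- ===== SOURCE A (Python) =====
-- def _side_by_side(left_header: list, left_rows: list, right_header: list, right_rows: list, gap: int = 1) -> list[list]:
--     """Merge two tables side-by-side with a gap column. Header row is the first row returned."""
--     w = len(left_header)
--     out = [left_header + [""] * gap + right_header]
--     for i in range(max(len(left_rows), len(right_rows))):
--         l = list(left_rows[i]) if i < len(left_rows) else [""] * w
--         r = list(right_rows[i]) if i < len(right_rows) else [""] * len(right_header)
--         out.append(l + [""] * gap + r)
--     return out
-- ===== SOURCE B (Python) =====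
-- def _side_by_side(left_header: list, left_rows: list, right_header: list, right_rows: list, gap: int = 1) -> list:
--     """Merge two tables side-by-side: build two full rectangular blocks (header + rows,
--     each padded to the common height in its own pass), widen the left block with the
--     gap columns, then zip the two equal-height blocks row by row."""
--     h = max(len(left_rows), len(right_rows))
--     left_block = [left_header] + left_rows + [[""] * len(left_header)] * (h - len(left_rows))
--     right_block = [right_header] + right_rows + [[""] * len(right_header)] * (h - len(right_rows))
--     left_block = [row + [""] * gap for row in left_block]
--     return [l + r for l, r in zip(left_block, right_block)]
-- ===== Notes on version B (the rewrite author's own statement) =====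
-- stated objective: alternative
-- what changed: Instead of A's single index loop with per-index bounds tests building each output row in place, B builds two complete rectangular blocks (header plus rows, each padded to the common height in its own staged pass), widens the left block with the gap columns in another pass, and finally zips the two equal-height blocks.
import Mathlib
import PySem

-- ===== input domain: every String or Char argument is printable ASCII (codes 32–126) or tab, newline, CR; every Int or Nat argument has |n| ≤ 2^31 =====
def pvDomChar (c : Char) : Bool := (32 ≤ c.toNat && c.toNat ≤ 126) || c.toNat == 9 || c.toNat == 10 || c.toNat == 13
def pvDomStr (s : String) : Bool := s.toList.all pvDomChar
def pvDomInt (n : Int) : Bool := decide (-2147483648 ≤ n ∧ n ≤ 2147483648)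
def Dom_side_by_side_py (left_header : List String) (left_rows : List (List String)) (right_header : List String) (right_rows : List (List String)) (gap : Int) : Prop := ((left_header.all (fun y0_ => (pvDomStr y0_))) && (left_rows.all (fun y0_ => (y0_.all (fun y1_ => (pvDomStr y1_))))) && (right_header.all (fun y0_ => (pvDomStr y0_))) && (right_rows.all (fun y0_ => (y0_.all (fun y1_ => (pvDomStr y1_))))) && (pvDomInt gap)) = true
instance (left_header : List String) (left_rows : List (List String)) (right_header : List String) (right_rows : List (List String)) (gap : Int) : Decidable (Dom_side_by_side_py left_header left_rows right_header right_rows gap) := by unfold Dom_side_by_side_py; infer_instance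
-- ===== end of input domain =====

-- B rebuilds the result in staged passes: two full rectangular blocks (header + rows,
-- each padded to the common height), the left one widened with the gap columns, then
-- zipped row by row — instead of A's single index loop with per-index bounds tests
-- (objective: alternative).


-- ===== PORT A =====
-- literal port of A: header row, then an index loop over range(max(len(left_rows), len(right_rows)))
def side_by_side_py (left_header : List String) (left_rows : List (List String)) (right_header : List String) (right_rows : List (List String)) (gap : Int) : List (List String) :=
  let w := left_header.length
  let out := [left_header ++ List.replicate gap.toNat "" ++ right_header]
  (PySem.List.pyRange 0 (max (left_rows.length : Int) (right_rows.length : Int)) 1).foldl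
    (fun out i =>
      let l := if i < (left_rows.length : Int) then PySem.List.pyGetD left_rows i [] else List.replicate w ""
      let r := if i < (right_rows.length : Int) then PySem.List.pyGetD right_rows i [] else List.replicate right_header.length ""
      out ++ [l ++ List.replicate gap.toNat "" ++ r]) out

-- ===== PORT B =====
-- literal port of Source B: two padded rectangular blocks, gap pass on the left block, then zip
def side_by_side_py_alt (left_header : List String) (left_rows : List (List String)) (right_header : List String) (right_rows : List (List String)) (gap : Int) : List (List String) :=
  let h := max left_rows.length right_rows.length
  let left_block := left_header :: (left_rows ++ List.replicate (h - left_rows.length) (List.replicate left_header.length ""))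
  let right_block := right_header :: (right_rows ++ List.replicate (h - right_rows.length) (List.replicate right_header.length ""))
  let left_block' := left_block.map (fun row => row ++ List.replicate gap.toNat "")
  (left_block'.zip right_block).map (fun p => p.1 ++ p.2)

-- ===== PRECONDITION & SPEC =====
def Spec_side_by_side_py (left_header : List String) (left_rows : List (List String)) (right_header : List String) (right_rows : List (List String)) (gap : Int) (out : List (List String)) : Prop := out = side_by_side_py_alt left_header left_rows right_header right_rows gap
instance (left_header : List String) (left_rows : List (List String)) (right_header : List String) (right_rows : List (List String)) (gap : Int) (out : List (List String)) : Decidable (Spec_side_by_side_py left_header left_rows right_header right_rows gap out) := by unfold Spec_side_by_side_py; infer_instance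

-- ===== CLAIM (what is proved, stated in full; the proofs are below) =====
def Claim_equal_side_by_side_py : Prop := ∀ (left_header : List String) (left_rows : List (List String)) (right_header : List String) (right_rows : List (List String)) (gap : Int), Dom_side_by_side_py left_header left_rows right_header right_rows gap → Spec_side_by_side_py left_header left_rows right_header right_rows gap (side_by_side_py left_header left_rows right_header right_rows gap)

-- ===== LEMMAS AND PROOFS =====

-- A's loop body as a function of the (Nat) loop index
def pvRowA (lrows rrows : List (List String)) (w rw g : Nat) (k : Nat) : List String :=
  (if k < lrows.length then lrows.getD k [] else List.replicate w "") ++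
  List.replicate g "" ++
  (if k < rrows.length then rrows.getD k [] else List.replicate rw "")

-- common middle form: the merged data rows, as structural recursion on the two row lists
def pvMergeB (lpad rpad blank : List String) : List (List String) → List (List String) → List (List String)
  | [], [] => []
  | l :: ls, [] => (l ++ blank ++ rpad) :: pvMergeB lpad rpad blank ls []
  | [], r :: rs => (lpad ++ blank ++ r) :: pvMergeB lpad rpad blank [] rs
  | l :: ls, r :: rs => (l ++ blank ++ r) :: pvMergeB lpad rpad blank ls rs

lemma pvRowA_succ (l : List String) (lrows : List (List String)) (r : List String)
    (rrows : List (List String)) (w rw g k : Nat) :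
    pvRowA (l :: lrows) (r :: rrows) w rw g (k + 1) = pvRowA lrows rrows w rw g k := by
  simp [pvRowA]

lemma pvRowA_succ_left (l : List String) (lrows : List (List String)) (w rw g k : Nat) :
    pvRowA (l :: lrows) [] w rw g (k + 1) = pvRowA lrows [] w rw g k := by
  simp [pvRowA]

lemma pvRowA_succ_right (r : List String) (rrows : List (List String)) (w rw g k : Nat) :
    pvRowA [] (r :: rrows) w rw g (k + 1) = pvRowA [] rrows w rw g k := by
  simp [pvRowA]

lemma pvMerge_left_nil (w rw g : Nat) (rrows : List (List String)) :
    (List.range rrows.length).map (pvRowA [] rrows w rw g) =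
    pvMergeB (List.replicate w "") (List.replicate rw "") (List.replicate g "") [] rrows := by
  induction rrows with
  | nil => simp [pvMergeB]
  | cons r rs ih =>
    simp only [List.length_cons]
    rw [List.range_succ_eq_map]
    simp only [List.map_cons, List.map_map, pvMergeB, List.cons.injEq]
    refine ⟨?_, ?_⟩
    · simp [pvRowA]
    · rw [← ih]
      exact List.map_congr_left (fun k _ => pvRowA_succ_right r rs w rw g k)

lemma pvMerge_main (w rw g : Nat) (lrows rrows : List (List String)) :
    (List.range (max lrows.length rrows.length)).map (pvRowA lrows rrows w rw g) =
    pvMergeB (List.replicate w "") (List.replicate rw "") (List.replicate g "") lrows rrows := by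
  induction lrows generalizing rrows with
  | nil =>
    simp only [List.length_nil, Nat.max_eq_right (Nat.zero_le _)]
    exact pvMerge_left_nil w rw g rrows
  | cons l ls ih =>
    cases rrows with
    | nil =>
      simp only [List.length_cons, List.length_nil]
      rw [Nat.max_eq_left (Nat.zero_le _), List.range_succ_eq_map]
      simp only [List.map_cons, List.map_map, pvMergeB, List.cons.injEq]
      refine ⟨?_, ?_⟩
      · simp [pvRowA]
      · rw [← ih []]
        simp only [List.length_nil, Nat.max_eq_left (Nat.zero_le _)]
        exact List.map_congr_left (fun k _ => pvRowA_succ_left l ls w rw g k)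
    | cons r rs =>
      simp only [List.length_cons]
      rw [show max (ls.length + 1) (rs.length + 1) = max ls.length rs.length + 1 by omega,
          List.range_succ_eq_map]
      simp only [List.map_cons, List.map_map, pvMergeB, List.cons.injEq]
      refine ⟨?_, ?_⟩
      · simp [pvRowA]
      · rw [← ih rs]
        exact List.map_congr_left (fun k _ => pvRowA_succ l ls r rs w rw g k)

-- B side: zipping the two padded blocks gives the same pvMergeB form
lemma pvZip_left_nil (lpad rpad blank : List String) (rrows : List (List String)) :
    ((List.replicate rrows.length lpad).zip rrows).map (fun p => p.1 ++ blank ++ p.2) =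
    pvMergeB lpad rpad blank [] rrows := by
  induction rrows with
  | nil => simp [pvMergeB]
  | cons r rs ih =>
    simp only [List.length_cons, List.replicate_succ, List.zip_cons_cons, List.map_cons, pvMergeB, List.cons.injEq]
    exact ⟨trivial, ih⟩

lemma pvZip_right_nil (lpad rpad blank : List String) (lrows : List (List String)) :
    (lrows.zip (List.replicate lrows.length rpad)).map (fun p => p.1 ++ blank ++ p.2) =
    pvMergeB lpad rpad blank lrows [] := by
  induction lrows with
  | nil => simp [pvMergeB]
  | cons l ls ih =>
    simp only [List.length_cons, List.replicate_succ, List.zip_cons_cons, List.map_cons, pvMergeB, List.cons.injEq]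
    exact ⟨trivial, ih⟩

lemma pvZip_main (lpad rpad blank : List String) (lrows rrows : List (List String)) :
    (((lrows ++ List.replicate (max lrows.length rrows.length - lrows.length) lpad)).zip
      (rrows ++ List.replicate (max lrows.length rrows.length - rrows.length) rpad)).map
      (fun p => p.1 ++ blank ++ p.2) =
    pvMergeB lpad rpad blank lrows rrows := by
  induction lrows generalizing rrows with
  | nil =>
    simp only [List.length_nil, Nat.max_eq_right (Nat.zero_le _), Nat.sub_zero,
      Nat.sub_self, List.replicate_zero, List.append_nil, List.nil_append]
    exact pvZip_left_nil lpad rpad blank rrows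
  | cons l ls ih =>
    cases rrows with
    | nil =>
      simp only [List.length_nil, List.length_cons, Nat.max_eq_left (Nat.zero_le _),
        Nat.sub_self, List.replicate_zero, List.append_nil, List.nil_append]
      rw [show ls.length + 1 = (l :: ls).length by simp]
      exact pvZip_right_nil lpad rpad blank (l :: ls)
    | cons r rs =>
      simp only [List.length_cons]
      rw [show max (ls.length + 1) (rs.length + 1) - (ls.length + 1)
            = max ls.length rs.length - ls.length by omega,
          show max (ls.length + 1) (rs.length + 1) - (rs.length + 1)
            = max ls.length rs.length - rs.length by omega]
      simp only [List.cons_append, List.zip_cons_cons, List.map_cons, pvMergeB,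
        List.cons.injEq, true_and]
      exact ih rs

-- ===== VERDICT (by name: the statement is the Claim_ definition above) =====
theorem side_by_side_py_spec : Claim_equal_side_by_side_py := by
  intro lh lrows rh rrows gap _
  show side_by_side_py lh lrows rh rrows gap = side_by_side_py_alt lh lrows rh rrows gap
  unfold side_by_side_py side_by_side_py_alt
  dsimp only
  rw [PySem.List.foldl_append_singleton_eq_map]
  -- B's zip form
  rw [List.map_cons, List.zip_cons_cons, List.map_cons]
  simp only [List.singleton_append, List.cons.injEq]
  refine ⟨by simp, ?_⟩
  have hmax : max (lrows.length : Int) (rrows.length : Int) =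
      ((max lrows.length rrows.length : Nat) : Int) := by push_cast; rfl
  rw [hmax, PySem.List.pyRange_zero_natCast, List.map_map]
  rw [List.zip_map_left, List.map_map]
  trans (List.range (max lrows.length rrows.length)).map
      (pvRowA lrows rrows lh.length rh.length gap.toNat)
  · exact List.map_congr_left (fun k _ => by simp [pvRowA, PySem.List.pyGetD_natCast])
  · rw [pvMerge_main lh.length rh.length gap.toNat lrows rrows,
        ← pvZip_main (List.replicate lh.length "") (List.replicate rh.length "")
          (List.replicate gap.toNat "") lrows rrows]
    exact List.map_congr_left (fun p _ => by simp)
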